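-- pv_equiv track=rewrite | github.com/aditya30103/Randomized_Pattern_Searching_Algorithms | Randomized_Pattern_Searching_Algorithms.py | modPatternMatch
-- ===== SOURCE A (Python) =====
-- def modPatternMatch(q,p,x):
-- 	# Time Complexity: O((m+n)logq)
-- 	# Working Memory: O(k+logn+logq)
--
-- 	Out = []
-- 	fpp, fpx = 0, 0
-- 	alpha = pow(26,len(p),q)
--
-- 	# O(m logq)
-- 	for i in range(0, len(p)):								# Computing Initial fp Values
-- 		fpp += (pow(26, len(p)-i-1,q) *((ord(p[i])-65) %q) %q)
-- 		fpx += (pow(26, len(p)-i-1,q) *((ord(x[i])-65) %q) %q)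
-- 	fpp = fpp % q
-- 	fpx = fpx % q
-- 	if (fpp == fpx): Out.append(0)
--
-- 	# O(n logq)
-- 	for j in range(len(p), len(x)):
-- 		fpx = ((26 %q)*fpx %q) - ((alpha)*((ord(x[j-len(p)])-65) %q) %q) + ((ord(x[j])-65) %q)
-- 		fpx = fpx % q
-- 		if (fpp == fpx): Out.append(j-len(p)+1)
-- 	return Out
-- ===== SOURCE B (Python) =====
-- def modPatternMatch(q, p, x):
--     # Prefix-fingerprint table instead of a rolling hash: build the Horner prefix
--     # hashes of x once, then read every window's fingerprint directly as
--     # H[i+m] - H[i]*26^m (mod q).  O(m + n + log q) arithmetic operations.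
--     m, n = len(p), len(x)
--     fpp = 0
--     for c in p:
--         fpp = (fpp * 26 + ord(c) - 65) % q
--     H = [0] * (n + 1)
--     for i in range(n):
--         H[i + 1] = (H[i] * 26 + ord(x[i]) - 65) % q
--     alpha = pow(26, m, q)
--     return [i for i in range(n - m + 1) if (H[i + m] - H[i] * alpha) % q == fpp]
-- ===== Notes on version B (the rewrite author's own statement) =====
-- stated objective: faster
-- what changed: B replaces the rolling-hash slide with a precomputed prefix-fingerprint table: each window's fingerprint is read directly as H[i+m]-H[i]*26^m (mod q), and the initial fingerprints use Horner's rule instead of a per-character modular pow.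
import Mathlib
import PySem

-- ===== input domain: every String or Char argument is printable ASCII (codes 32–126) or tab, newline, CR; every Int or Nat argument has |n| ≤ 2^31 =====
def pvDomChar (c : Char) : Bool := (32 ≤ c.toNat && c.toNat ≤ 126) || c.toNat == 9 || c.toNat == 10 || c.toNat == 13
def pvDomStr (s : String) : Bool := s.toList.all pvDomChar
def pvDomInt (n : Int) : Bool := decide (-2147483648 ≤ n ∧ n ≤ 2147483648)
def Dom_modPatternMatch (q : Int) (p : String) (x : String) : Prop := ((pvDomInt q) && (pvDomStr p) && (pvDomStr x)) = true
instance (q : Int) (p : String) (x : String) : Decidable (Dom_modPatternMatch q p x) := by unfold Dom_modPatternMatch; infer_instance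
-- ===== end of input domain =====

-- B replaces A's rolling-hash slide by a prefix-fingerprint table: it builds the Horner
-- prefix hashes of x once and reads each window's fingerprint as H[i+m] - H[i]*26^m (mod q)
-- (objective: faster; a timing run measures the speed claim).

-- ===== PORT A =====
-- ord(s[i]); `none` (Python IndexError) is unreachable under Pre_ and maps to 0
def pvOrdAt (s : String) (i : Int) : Int :=
  match PySem.Str.pyGet? s i with
  | some c => (c.toNat : Int)
  | none => 0

def modPatternMatch (q : Int) (p : String) (x : String) : List Int :=
  let m := PySem.Str.len p
  -- pow(26, len(p), q): exponent is ≥ 0 here, so `.toNat` is exact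
  let alpha := PySem.Int.powMod 26 m.toNat q
  let fp :=
    (PySem.List.pyRange 0 m).foldl (fun (s : Int × Int) i =>
      (s.1 + PySem.Int.mod (PySem.Int.powMod 26 (m - i - 1).toNat q * PySem.Int.mod (pvOrdAt p i - 65) q) q,
       s.2 + PySem.Int.mod (PySem.Int.powMod 26 (m - i - 1).toNat q * PySem.Int.mod (pvOrdAt x i - 65) q) q))
      (0, 0)
  let fpp := PySem.Int.mod fp.1 q
  let fpx0 := PySem.Int.mod fp.2 q
  let st :=
    (PySem.List.pyRange m (PySem.Str.len x)).foldl (fun (s : Int × List Int) j =>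
      let t := PySem.Int.mod (PySem.Int.mod 26 q * s.1) q
               - PySem.Int.mod (alpha * PySem.Int.mod (pvOrdAt x (j - m) - 65) q) q
               + PySem.Int.mod (pvOrdAt x j - 65) q
      let fpx := PySem.Int.mod t q
      (fpx, if fpp = fpx then s.2 ++ [j - m + 1] else s.2))
      (fpx0, if fpp = fpx0 then [0] else [])
  st.2

-- ===== PORT B =====
def modPatternMatch_alt (q : Int) (p : String) (x : String) : List Int :=
  let m := PySem.Str.len p
  let n := PySem.Str.len x
  let fpp := p.toList.foldl (fun h c => PySem.Int.mod (h * 26 + (c.toNat : Int) - 65) q) 0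
  -- the `H[i+1] = (H[i]*26 + ord(x[i]) - 65) % q` loop: carry (H so far, current value)
  let H := (x.toList.foldl (fun (s : List Int × Int) c =>
      let h := PySem.Int.mod (s.2 * 26 + (c.toNat : Int) - 65) q
      (s.1 ++ [h], h)) ([0], 0)).1
  let alpha := PySem.Int.powMod 26 m.toNat q
  -- the list comprehension; every index read is in range, so `.toNat`+getD is exact
  (PySem.List.pyRange 0 (n - m + 1)).filter (fun i =>
    decide (PySem.Int.mod (H.getD (i + m).toNat 0 - H.getD i.toNat 0 * alpha) q = fpp))

-- ===== PRECONDITION & SPEC =====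
-- Pre_ excludes exactly the inputs where A raises: q = 0 (ValueError in pow/%) and
-- len(p) > len(x) (IndexError on x[i] in A's first loop).
def Pre_modPatternMatch (q : Int) (p : String) (x : String) : Prop :=
  q ≠ 0 ∧ PySem.Str.len p ≤ PySem.Str.len x
instance (q : Int) (p : String) (x : String) : Decidable (Pre_modPatternMatch q p x) := by
  unfold Pre_modPatternMatch; infer_instance
def pvWitness_modPatternMatch : Int × String × String := (7, "AB", "ABAB")


def Spec_modPatternMatch (q : Int) (p : String) (x : String) (out : List Int) : Prop := out = modPatternMatch_alt q p x
instance (q : Int) (p : String) (x : String) (out : List Int) : Decidable (Spec_modPatternMatch q p x out) := by unfold Spec_modPatternMatch; infer_instance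

-- ===== CLAIM (what is proved, stated in full; the proofs are below) =====
def Claim_equal_modPatternMatch : Prop := ∀ (q : Int) (p : String) (x : String), Dom_modPatternMatch q p x → Pre_modPatternMatch q p x → Spec_modPatternMatch q p x (modPatternMatch q p x)

-- ===== LEMMAS AND PROOFS =====

theorem pvmod_modEq (a q : Int) : PySem.Int.mod a q ≡ a [ZMOD q] :=
  Int.modEq_iff_dvd.mpr Int.dvd_self_sub_fmod

theorem pvmod_congr {a b q : Int} (h : a ≡ b [ZMOD q]) : PySem.Int.mod a q = PySem.Int.mod b q := by
  obtain ⟨k, hk⟩ : q ∣ b - a := Int.modEq_iff_dvd.mp h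
  have hb : b = a + q * k := by linarith
  show Int.fmod a q = Int.fmod b q
  rw [hb, Int.add_mul_fmod_self_left]

theorem pvpowMod_modEq (e : Nat) (q : Int) : PySem.Int.powMod 26 e q ≡ 26 ^ e [ZMOD q] :=
  pvmod_modEq _ q

-- the character values ord(c) - 65 of a string, and the pure (un-reduced) Horner fingerprint
def pvVal (c : Char) : Int := (c.toNat : Int) - 65
def pvVals (s : String) : List Int := s.toList.map pvVal
def pvH : Int → Int → Int := fun h v => h * 26 + v
def pvP (l : List Int) : Int := l.foldl pvH 0
-- fingerprint of the window of length m starting at t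
def pvW (x : String) (m t : Nat) : Int := pvP (((pvVals x).drop t).take m)

theorem pv_horner_shift (l : List Int) (a : Int) :
    l.foldl pvH a = a * 26 ^ l.length + pvP l := by
  induction l generalizing a with
  | nil => simp [pvP]
  | cons v t ih =>
    simp only [List.foldl_cons, List.length_cons, ih (pvH a v), pvP, List.foldl_cons,
      ih (pvH 0 v)]
    unfold pvH
    ring

theorem pv_horner_mod (q : Int) (l : List Int) (a : Int) :
    l.foldl (fun h v => PySem.Int.mod (pvH h v) q) (PySem.Int.mod a q) =
      PySem.Int.mod (l.foldl pvH a) q := by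
  induction l generalizing a with
  | nil => simp
  | cons v t ih =>
    simp only [List.foldl_cons]
    have h1 : PySem.Int.mod (pvH (PySem.Int.mod a q) v) q = PySem.Int.mod (pvH a v) q :=
      pvmod_congr (Int.ModEq.add_right v (Int.ModEq.mul_right 26 (pvmod_modEq a q)))
    rw [h1, ih (pvH a v)]

theorem pv_horner_mod0 (q : Int) (l : List Int) :
    l.foldl (fun h v => PySem.Int.mod (pvH h v) q) 0 = PySem.Int.mod (pvP l) q := by
  have := pv_horner_mod q l 0
  rwa [show PySem.Int.mod (0 : Int) q = (0 : Int) from Int.zero_fmod q] at this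

theorem pv_dvd_sum_sub {q : Int} {r : List Nat} {f g : Nat → Int}
    (h : ∀ k ∈ r, f k ≡ g k [ZMOD q]) :
    ((r.map f).sum : Int) ≡ (r.map g).sum [ZMOD q] := by
  induction r with
  | nil => rfl
  | cons a t ih =>
    simp only [List.map_cons, List.sum_cons]
    exact Int.ModEq.add (h a (by simp)) (ih (fun k hk => h k (List.mem_cons_of_mem a hk)))


theorem pv_horner_sum (lv : List Int) (a : Int) :
    lv.foldl pvH a =
      a * 26 ^ lv.length +
        ((List.range lv.length).map (fun k => 26 ^ (lv.length - k - 1) * lv.getD k 0)).sum := by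
  induction lv generalizing a with
  | nil => simp
  | cons v t ih =>
    simp only [List.foldl_cons, List.length_cons, ih (pvH a v), List.range_succ_eq_map,
      List.map_cons, List.map_map, List.sum_cons]
    have h1 : (fun k => 26 ^ (t.length + 1 - k - 1) * (v :: t).getD k 0) ∘ Nat.succ
        = fun k => 26 ^ (t.length - k - 1) * t.getD k 0 := by
      funext k
      simp [Function.comp, Nat.succ_sub_succ]
    rw [h1]
    simp only [List.getD_cons_zero, pvH]
    have h2 : t.length + 1 - 0 - 1 = t.length := by omega
    rw [h2]
    ring

theorem pv_first_loop (q : Int) (lv : List Int) :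
    PySem.Int.mod
      (((List.range lv.length).map
          (fun k => PySem.Int.mod (PySem.Int.powMod 26 (lv.length - k - 1) q * PySem.Int.mod (lv.getD k 0) q) q)).sum) q
    = lv.foldl (fun h v => PySem.Int.mod (pvH h v) q) 0 := by
  have hcong :
      (((List.range lv.length).map
          (fun k => PySem.Int.mod (PySem.Int.powMod 26 (lv.length - k - 1) q * PySem.Int.mod (lv.getD k 0) q) q)).sum : Int)
        ≡ ((List.range lv.length).map (fun k => 26 ^ (lv.length - k - 1) * lv.getD k 0)).sum [ZMOD q] := by
    refine pv_dvd_sum_sub (fun k _ => ?_)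
    exact (pvmod_modEq _ q).trans ((pvpowMod_modEq _ q).mul (pvmod_modEq _ q))
  rw [pvmod_congr hcong, pv_horner_mod0]
  congr 1
  unfold pvP
  rw [pv_horner_sum lv 0]
  ring

theorem pv_chars_fold (q : Int) (cs : List Char) :
    cs.foldl (fun h c => PySem.Int.mod (h * 26 + (c.toNat : Int) - 65) q) 0
      = PySem.Int.mod (pvP (cs.map pvVal)) q := by
  rw [← pv_horner_mod0, List.foldl_map]
  have hf : (fun (h : Int) (c : Char) => PySem.Int.mod (pvH h (pvVal c)) q)
      = fun (h : Int) (c : Char) => PySem.Int.mod (h * 26 + (c.toNat : Int) - 65) q := by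
    funext h c
    congr 1
    unfold pvH pvVal
    ring
  rw [hf]

-- A's first loop over indices 0..n-1 of s equals mod of the pure Horner fingerprint of s[:n]
theorem pv_first_generic (q : Int) (s : String) (n : Nat) (hn : n ≤ s.toList.length) :
    PySem.Int.mod
      ((List.map
          (fun i => PySem.Int.mod (PySem.Int.powMod 26 (((n : Int) - i - 1).toNat) q * PySem.Int.mod (pvOrdAt s i - 65) q) q)
          (PySem.List.pyRange 0 (n : Int))).sum) q
    = PySem.Int.mod (pvP ((pvVals s).take n)) q := by
  have hlv : ((s.toList.take n).map (fun c => (c.toNat : Int) - 65)).length = n := by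
    rw [List.length_map, List.length_take]
    omega
  have key := pv_first_loop q ((s.toList.take n).map (fun c => (c.toNat : Int) - 65))
  rw [hlv] at key
  have hmaps :
      List.map
          (fun i => PySem.Int.mod (PySem.Int.powMod 26 (((n : Int) - i - 1).toNat) q * PySem.Int.mod (pvOrdAt s i - 65) q) q)
          (PySem.List.pyRange 0 (n : Int))
        = List.map
            (fun k => PySem.Int.mod
              (PySem.Int.powMod 26 (n - k - 1) q *
                PySem.Int.mod (((s.toList.take n).map (fun c => (c.toNat : Int) - 65)).getD k 0) q) q)
            (List.range n) := by
    rw [PySem.List.pyRange_zero_natCast, List.map_map]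
    refine List.map_congr_left ?_
    intro k hk
    have hk' : k < n := List.mem_range.mp hk
    have hks : k < s.toList.length := lt_of_lt_of_le hk' hn
    have h1 : (((n : Int)) - (k : Int) - 1).toNat = n - k - 1 := by omega
    have h2 : pvOrdAt s (k : Int) = ((s.toList[k]'hks).toNat : Int) := by
      unfold pvOrdAt
      rw [PySem.Str.pyGet?_natCast, List.getElem?_eq_getElem hks]
    have hkt : k < ((s.toList.take n).map (fun c => (c.toNat : Int) - 65)).length := by omega
    have h3 : ((s.toList.take n).map (fun c => (c.toNat : Int) - 65)).getD k 0
        = ((s.toList[k]'hks).toNat : Int) - 65 := by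
      rw [List.getD_eq_getElem _ _ hkt]
      simp [List.getElem_take]
    simp only [Function.comp_apply, h1, h2, h3]
  rw [hmaps, key]
  have hvals : (s.toList.take n).map (fun c => (c.toNat : Int) - 65) = (pvVals s).take n := by
    show (s.toList.take n).map pvVal = (s.toList.map pvVal).take n
    rw [List.map_take]
  rw [show ((s.toList.take n).map (fun c => (c.toNat : Int) - 65)).foldl (fun h v => PySem.Int.mod (pvH h v) q) 0
      = PySem.Int.mod (pvP ((pvVals s).take n)) q from by rw [hvals, pv_horner_mod0]]

-- rolling identity for the pure fingerprints
theorem pv_roll (x : String) (m k : Nat) (h : k + m < (pvVals x).length) :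
    26 * pvW x m k - 26 ^ m * (pvVals x).getD k 0 + (pvVals x).getD (k + m) 0 = pvW x m (k + 1) := by
  set L := pvVals x with hL
  match m with
  | 0 =>
    simp [pvW, pvP]
  | M + 1 =>
    have hk : k < L.length := by omega
    have hwlen : ((L.drop (k + 1)).take M).length = M := by
      rw [List.length_take, List.length_drop]
      omega
    have hMidx : M < (L.drop (k + 1)).length := by
      rw [List.length_drop]
      omega
    have hdrop : L.drop k = L[k] :: L.drop (k + 1) := List.drop_eq_getElem_cons hk
    have hWk : pvW x (M + 1) k = L[k] * 26 ^ M + pvP ((L.drop (k + 1)).take M) := by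
      show pvP ((L.drop k).take (M + 1)) = _
      rw [hdrop, List.take_succ_cons]
      show ((L.drop (k + 1)).take M).foldl pvH (pvH 0 L[k]) = _
      rw [show pvH 0 L[k] = L[k] from by unfold pvH; ring, pv_horner_shift, hwlen]
    have hWk1 : pvW x (M + 1) (k + 1) = pvP ((L.drop (k + 1)).take M) * 26 + L[k + (M + 1)]'(by omega) := by
      show pvP ((L.drop (k + 1)).take (M + 1)) = _
      rw [List.take_add_one, List.getElem?_eq_getElem hMidx]
      simp only [Option.toList_some]
      show (((L.drop (k + 1)).take M) ++ [(L.drop (k + 1))[M]]).foldl pvH 0 = _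
      rw [List.foldl_append]
      show pvH (((L.drop (k + 1)).take M).foldl pvH 0) ((L.drop (k + 1))[M]) = _
      rw [List.getElem_drop]
      unfold pvH
      simp only [show k + 1 + M = k + (M + 1) from by omega]
      rfl
    rw [hWk, hWk1, List.getD_eq_getElem L 0 hk, List.getD_eq_getElem L 0 (by omega)]
    ring

theorem pv_split (x : String) (m k : Nat) (h : k + m ≤ (pvVals x).length) :
    pvP ((pvVals x).take (k + m)) = pvP ((pvVals x).take k) * 26 ^ m + pvW x m k := by
  set L := pvVals x with hL
  have hwlen : ((L.drop k).take m).length = m := by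
    rw [List.length_take, List.length_drop]
    omega
  rw [List.take_add]
  show (L.take k ++ (L.drop k).take m).foldl pvH 0 = _
  rw [List.foldl_append, pv_horner_shift, hwlen]
  rfl


-- scan of prefix fingerprints (the list B's H-building loop produces)
def pvScan (q : Int) : Int → List Int → List Int
  | _, [] => []
  | h, v :: t => PySem.Int.mod (pvH h v) q :: pvScan q (PySem.Int.mod (pvH h v) q) t

theorem pv_B_fold (q : Int) (cs : List Char) :
    ∀ (hs : List Int) (h : Int),
      (cs.foldl (fun (s : List Int × Int) c =>
          (s.1 ++ [PySem.Int.mod (s.2 * 26 + (c.toNat : Int) - 65) q],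
           PySem.Int.mod (s.2 * 26 + (c.toNat : Int) - 65) q)) (hs, h)).1
        = hs ++ pvScan q h (cs.map pvVal) := by
  induction cs with
  | nil =>
    intro hs h
    simp [pvScan]
  | cons c t ih =>
    intro hs h
    rw [List.map_cons, List.foldl_cons, pvScan]
    have he : PySem.Int.mod (h * 26 + (c.toNat : Int) - 65) q = PySem.Int.mod (pvH h (pvVal c)) q := by
      congr 1
      unfold pvH pvVal
      ring
    rw [he, ih (hs ++ [PySem.Int.mod (pvH h (pvVal c)) q]) _]
    simp

theorem pvScan_getD (q : Int) (vs : List Int) :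
    ∀ (h : Int) (i : Nat), i < vs.length →
      (pvScan q h vs).getD i 0 = (vs.take (i + 1)).foldl (fun a v => PySem.Int.mod (pvH a v) q) h := by
  induction vs with
  | nil =>
    intro h i hi
    simp at hi
  | cons v t ih =>
    intro h i hi
    match i with
    | 0 => simp [pvScan]
    | i + 1 =>
      rw [pvScan]
      show (pvScan q (PySem.Int.mod (pvH h v) q) t).getD i 0 = _
      rw [ih _ i (by simpa using hi), List.take_succ_cons, List.foldl_cons]

theorem pv_H_getD (q : Int) (x : String) (i : Nat) (hi : i ≤ (pvVals x).length) :
    ((0 : Int) :: pvScan q 0 (pvVals x)).getD i 0 = PySem.Int.mod (pvP ((pvVals x).take i)) q := by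
  match i with
  | 0 =>
    simp [pvP]
    exact (Int.zero_fmod q).symm
  | i + 1 =>
    rw [List.getD_cons_succ, pvScan_getD q _ 0 i (by omega)]
    exact pv_horner_mod0 q ((pvVals x).take (i + 1))

theorem pv_ord_val (x : String) (K : Nat) (h : K < x.toList.length) :
    pvOrdAt x (K : Int) - 65 = (pvVals x).getD K 0 := by
  unfold pvOrdAt
  rw [PySem.Str.pyGet?_natCast, List.getElem?_eq_getElem h,
    List.getD_eq_getElem _ _ (by simpa [pvVals] using h)]
  simp [pvVals, pvVal]

-- A's sliding loop, fully unrolled to a filtered range of window fingerprints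
theorem pv_A_loop (q F alpha : Int) (x : String) (m : Nat)
    (halpha : alpha ≡ 26 ^ m [ZMOD q]) :
    ∀ (d K : Nat) (acc : List Int), m + K + d = (pvVals x).length →
      ((PySem.List.pyRange ((m : Int) + (K : Int)) ((pvVals x).length : Int)).foldl
        (fun (s : Int × List Int) j =>
          (PySem.Int.mod (PySem.Int.mod (PySem.Int.mod 26 q * s.1) q
              - PySem.Int.mod (alpha * PySem.Int.mod (pvOrdAt x (j - (m : Int)) - 65) q) q
              + PySem.Int.mod (pvOrdAt x j - 65) q) q,
           if F = PySem.Int.mod (PySem.Int.mod (PySem.Int.mod 26 q * s.1) q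
              - PySem.Int.mod (alpha * PySem.Int.mod (pvOrdAt x (j - (m : Int)) - 65) q) q
              + PySem.Int.mod (pvOrdAt x j - 65) q) q then s.2 ++ [j - (m : Int) + 1] else s.2))
        (PySem.Int.mod (pvW x m K) q, acc)).2
      = acc ++ (((List.range d).filter
            (fun t => decide (F = PySem.Int.mod (pvW x m (K + t + 1)) q))).map
          (fun t => ((K + t + 1 : Nat) : Int))) := by
  intro d
  induction d with
  | zero =>
    intro K acc hKd
    rw [PySem.List.pyRange_one_eq_nil (by omega)]
    simp
  | succ d ih =>
    intro K acc hKd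
    have hxlen : (pvVals x).length = x.toList.length := by simp [pvVals]
    have hlt : ((m : Int) + (K : Int)) < ((pvVals x).length : Int) := by omega
    rw [PySem.List.pyRange_one_cons hlt, List.foldl_cons]
    have hj1 : ((m : Int) + (K : Int)) - (m : Int) = ((K : Nat) : Int) := by ring
    have hj2 : ((m : Int) + (K : Int)) = (((m + K : Nat)) : Int) := by push_cast; ring
    have hv1 : pvOrdAt x (((m : Int) + (K : Int)) - (m : Int)) - 65 = (pvVals x).getD K 0 := by
      rw [hj1, pv_ord_val x K (by omega)]
    have hv2 : pvOrdAt x ((m : Int) + (K : Int)) - 65 = (pvVals x).getD (K + m) 0 := by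
      rw [hj2, pv_ord_val x (m + K) (by omega), show m + K = K + m from Nat.add_comm m K]
    simp only [hv1, hv2]
    have hstep :
        PySem.Int.mod (PySem.Int.mod (PySem.Int.mod 26 q * PySem.Int.mod (pvW x m K) q) q
            - PySem.Int.mod (alpha * PySem.Int.mod ((pvVals x).getD K 0) q) q
            + PySem.Int.mod ((pvVals x).getD (K + m) 0) q) q
          = PySem.Int.mod (pvW x m (K + 1)) q := by
      have t1 : PySem.Int.mod (PySem.Int.mod 26 q * PySem.Int.mod (pvW x m K) q) q
          ≡ 26 * pvW x m K [ZMOD q] :=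
        (pvmod_modEq _ q).trans ((pvmod_modEq 26 q).mul (pvmod_modEq _ q))
      have t2 : PySem.Int.mod (alpha * PySem.Int.mod ((pvVals x).getD K 0) q) q
          ≡ 26 ^ m * (pvVals x).getD K 0 [ZMOD q] :=
        (pvmod_modEq _ q).trans (halpha.mul (pvmod_modEq _ q))
      have t3 := pvmod_modEq ((pvVals x).getD (K + m) 0) q
      rw [pvmod_congr ((t1.sub t2).add t3), pv_roll x m K (by omega)]
    simp only [hstep]
    have hnext : ((m : Int) + (K : Int)) + 1 = ((m : Int) + ((K + 1 : Nat) : Int)) := by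
      push_cast
      ring
    have hidx : ((m : Int) + (K : Int)) - (m : Int) + 1 = (((K + 1 : Nat)) : Int) := by
      push_cast
      ring
    rw [hidx, hnext, ih (K + 1) _ (by omega)]
    have hf1 : ((fun t => decide (F = PySem.Int.mod (pvW x m (K + t + 1)) q)) ∘ Nat.succ)
        = fun t => decide (F = PySem.Int.mod (pvW x m (K + 1 + t + 1)) q) := by
      funext t
      simp only [Function.comp_apply]
      rw [show K + t.succ + 1 = K + 1 + t + 1 from by omega]
    rw [List.range_succ_eq_map, List.filter_cons, List.filter_map, hf1]
    by_cases hc : F = PySem.Int.mod (pvW x m (K + 1)) q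
    all_goals simp [hc, List.map_map]
    all_goals intros
    all_goals omega

-- ===== VERDICT (by name: the statement is the Claim_ definition above) =====
theorem modPatternMatch_spec : Claim_equal_modPatternMatch := by
  intro q p x _ hpre
  obtain ⟨hq, hlen⟩ := hpre
  show modPatternMatch q p x = modPatternMatch_alt q p x
  rw [PySem.Str.len_eq p, PySem.Str.len_eq x] at hlen
  have hmn : p.toList.length ≤ x.toList.length := by exact_mod_cast hlen
  have hxlen : (pvVals x).length = x.toList.length := by simp [pvVals]
  simp only [modPatternMatch, modPatternMatch_alt, PySem.Str.len_eq]
  simp only [PySem.List.foldl_prod_mk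
    (fun (a : Int) (i : Int) => a + PySem.Int.mod (PySem.Int.powMod 26 (((p.toList.length : Int)) - i - 1).toNat q * PySem.Int.mod (pvOrdAt p i - 65) q) q)
    (fun (a : Int) (i : Int) => a + PySem.Int.mod (PySem.Int.powMod 26 (((p.toList.length : Int)) - i - 1).toNat q * PySem.Int.mod (pvOrdAt x i - 65) q) q),
    PySem.List.foldl_add, zero_add]
  have hA1 := pv_first_generic q p p.toList.length le_rfl
  have hA2 := pv_first_generic q x p.toList.length hmn
  have hppfull : (pvVals p).take p.toList.length = pvVals p :=
    List.take_of_length_le (by simp [pvVals])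
  rw [hppfull] at hA1
  have hW0 : pvP ((pvVals x).take p.toList.length) = pvW x p.toList.length 0 := by
    unfold pvW
    rw [List.drop_zero]
  rw [hW0] at hA2
  rw [hA1, hA2]
  -- A's sliding loop
  have halpha : PySem.Int.powMod 26 ((p.toList.length : Int)).toNat q ≡ 26 ^ p.toList.length [ZMOD q] := by
    rw [Int.toNat_natCast]
    exact pvpowMod_modEq _ q
  have hloop := pv_A_loop q (PySem.Int.mod (pvP (pvVals p)) q)
      (PySem.Int.powMod 26 ((p.toList.length : Int)).toNat q) x p.toList.length halpha
      (x.toList.length - p.toList.length) 0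
      (if PySem.Int.mod (pvP (pvVals p)) q = PySem.Int.mod (pvW x p.toList.length 0) q then [0] else [])
      (by omega)
  rw [show ((p.toList.length : Int) + ((0 : Nat) : Int)) = (p.toList.length : Int) from by simp,
    hxlen] at hloop
  rw [hloop]
  -- B's fingerprint, prefix table, and comprehension
  rw [pv_chars_fold q p.toList]
  rw [show p.toList.map pvVal = pvVals p from rfl]
  rw [pv_B_fold q x.toList [0] 0]
  rw [show x.toList.map pvVal = pvVals x from rfl]
  rw [show ((x.toList.length : Int) - (p.toList.length : Int) + 1)
      = ((x.toList.length - p.toList.length + 1 : Nat) : Int) from by omega]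
  rw [PySem.List.pyRange_zero_natCast, List.filter_map]
  conv_rhs => rw [List.filter_congr (q := fun K : Nat =>
      decide (PySem.Int.mod (pvP (pvVals p)) q = PySem.Int.mod (pvW x p.toList.length K) q))
    (by
      intro K hK
      have hKle : K ≤ x.toList.length - p.toList.length := by
        have := List.mem_range.mp hK
        omega
      have hcg : PySem.Int.mod (pvP ((pvVals x).take (K + p.toList.length))) q
            - PySem.Int.mod (pvP ((pvVals x).take K)) q * PySem.Int.powMod 26 p.toList.length q
          ≡ pvW x p.toList.length K [ZMOD q] := by
        have h1 := (pvmod_modEq (pvP ((pvVals x).take (K + p.toList.length))) q).sub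
          ((pvmod_modEq (pvP ((pvVals x).take K)) q).mul (pvpowMod_modEq p.toList.length q))
        have h2 : pvP ((pvVals x).take (K + p.toList.length))
            - pvP ((pvVals x).take K) * 26 ^ p.toList.length = pvW x p.toList.length K := by
          rw [pv_split x p.toList.length K (by omega)]
          ring
        rw [h2] at h1
        exact h1
      simp only [Function.comp_apply, Int.toNat_natCast,
        show ((K : Int) + (p.toList.length : Int)).toNat = K + p.toList.length from by omega,
        List.singleton_append,
        pv_H_getD q x (K + p.toList.length) (by omega), pv_H_getD q x K (by omega)]
      rw [decide_eq_decide, pvmod_congr hcg]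
      exact eq_comm)]
  -- both sides are now the same filtered range, up to peeling off index 0
  rw [List.range_succ_eq_map, List.filter_cons, List.filter_map]
  have hg1 : ((fun K : Nat => decide (PySem.Int.mod (pvP (pvVals p)) q = PySem.Int.mod (pvW x p.toList.length K) q)) ∘ Nat.succ)
      = fun t : Nat => decide (PySem.Int.mod (pvP (pvVals p)) q = PySem.Int.mod (pvW x p.toList.length (0 + t + 1)) q) := by
    funext t
    simp only [Function.comp_apply]
    rw [show t.succ = 0 + t + 1 from by omega]
  have hg2 : ((fun K : Nat => ((K : Nat) : Int)) ∘ Nat.succ)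
      = fun t : Nat => ((0 + t + 1 : Nat) : Int) := by
    funext t
    simp only [Function.comp_apply]
    rw [show t.succ = 0 + t + 1 from by omega]
  rw [hg1]
  by_cases hc : PySem.Int.mod (pvP (pvVals p)) q = PySem.Int.mod (pvW x p.toList.length 0) q
  · rw [if_pos hc, if_pos (show (decide (PySem.Int.mod (pvP (pvVals p)) q = PySem.Int.mod (pvW x p.toList.length 0) q)) = true from by simpa using hc)]
    simp [List.map_map, hg2]
  · rw [if_neg hc, if_neg (show ¬ (decide (PySem.Int.mod (pvP (pvVals p)) q = PySem.Int.mod (pvW x p.toList.length 0) q)) = true from by simpa using hc)]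
    simp [List.map_map, hg2]
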